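-- pv_equiv track=rewrite | github.com/Anti-Phish/Phishing-Checker | Vectorizer.py | make_tokens
-- ===== SOURCE A (Python) =====
-- def make_tokens(f):
--     tkns_BySlash = str(f.encode('utf-8')).split('/')  # make tokens after splitting by slash
--     total_Tokens = []
--     for i in tkns_BySlash:
--         tokens = str(i).split('-')  # make tokens after splitting by dash
--         tkns_ByDot = []
--         for j in range(0, len(tokens)):
--             temp_Tokens = str(tokens[j]).split('.')  # make tokens after splitting by dot
--             tkns_ByDot = tkns_ByDot + temp_Tokens
--         total_Tokens = total_Tokens + tokens + tkns_ByDot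
--     total_Tokens = list(set(total_Tokens))  # remove redundant tokens
--     if 'com' in total_Tokens:
--         total_Tokens.remove(
--             'com')  # removing .com since it occurs a lot of times and it should not be included in our features
--     return total_Tokens
-- ===== SOURCE B (Python) =====
-- def make_tokens(f):
--     # single pass over the repr of the encoded string: a small state machine with
--     # two running buffers (current dash-token, current dot-piece) instead of
--     # nested str.split passes and list concatenations
--     s = str(f.encode('utf-8'))
--     seen = {}        # insertion-ordered seen-set
--     dash = []        # chars of the current dash-level token
--     dot = []         # chars of the current dot-level piece
--     dashes = []      # dash-tokens of the current slash segment
--     dots = []        # dot-pieces of the current slash segment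
--     for c in s:
--         if c == '/':
--             dashes.append(''.join(dash)); dots.append(''.join(dot))
--             for t in dashes:
--                 seen[t] = None
--             for t in dots:
--                 seen[t] = None
--             dashes = []; dots = []; dash = []; dot = []
--         elif c == '-':
--             dashes.append(''.join(dash)); dots.append(''.join(dot))
--             dash = []; dot = []
--         elif c == '.':
--             dots.append(''.join(dot))
--             dot = []; dash.append(c)
--         else:
--             dash.append(c); dot.append(c)
--     dashes.append(''.join(dash)); dots.append(''.join(dot))
--     for t in dashes:
--         seen[t] = None
--     for t in dots:
--         seen[t] = None
--     return [t for t in seen if t != 'com']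
-- ===== Notes on version B (the rewrite author's own statement) =====
-- stated objective: alternative
-- what changed: B replaces A's three nested str.split passes with repeated list concatenations and a final set()+remove by a single character-level state machine over the encoded repr that keeps two running buffers (current dash-token, current dot-piece), flushes them into an ordered seen-dict at each delimiter, and filters the excluded token out at the end.
import Mathlib
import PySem

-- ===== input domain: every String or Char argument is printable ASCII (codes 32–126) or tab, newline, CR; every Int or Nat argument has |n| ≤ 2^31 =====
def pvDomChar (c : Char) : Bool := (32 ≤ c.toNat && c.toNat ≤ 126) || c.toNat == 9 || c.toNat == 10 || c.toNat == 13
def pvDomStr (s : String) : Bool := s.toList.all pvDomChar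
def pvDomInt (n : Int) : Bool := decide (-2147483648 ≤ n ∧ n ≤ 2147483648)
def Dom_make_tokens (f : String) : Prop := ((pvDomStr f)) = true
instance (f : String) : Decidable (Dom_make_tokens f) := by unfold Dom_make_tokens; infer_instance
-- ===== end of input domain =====

-- B replaces A's three nested str.split passes and list concatenations by ONE character-level
-- state machine over the encoded repr, with two running buffers flushed into an ordered
-- seen-dict at each delimiter (objective: alternative).
-- NOTE on list order: both Pythons return a list from a hash set / dict; the behavioural
-- comparison of the return value is as a SET, and both ports use first-occurrence order.

-- shared primitive: str(f.encode('utf-8')) — Python's bytes repr, exact on Dom (printable ASCII + tab/newline/CR):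
-- quote is ' unless the string contains ' and no ", backslash/tab/newline/CR and the quote char are escaped.
def pvEsc (q c : Char) : List Char :=
  if c = '\\' then ['\\', '\\']
  else if c = '\t' then ['\\', 't']
  else if c = '\n' then ['\\', 'n']
  else if c = '\r' then ['\\', 'r']
  else if c = q then ['\\', q]
  else [c]

def pvBytesRepr (f : String) : List Char :=
  let cs := f.toList
  let q : Char := if cs.contains '\'' && !(cs.contains '"') then '"' else '\''
  'b' :: q :: (cs.flatMap (pvEsc q) ++ [q])

-- ===== PORT A =====
def make_tokens (f : String) : List String :=
  let tknsBySlash := PySem.Chars.splitOn (pvBytesRepr f) ['/']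
  let totalTokens := tknsBySlash.foldl (fun totalTokens i =>
    let tokens := PySem.Chars.splitOn i ['-']
    let tknsByDot := (PySem.List.pyRange 0 (PySem.List.len tokens)).foldl
      (fun tknsByDot j => tknsByDot ++ PySem.Chars.splitOn (PySem.List.pyGetD tokens j []) ['.']) []
    totalTokens ++ tokens ++ tknsByDot) []
  let totalTokens := PySem.Set.ofList totalTokens     -- list(set(total_Tokens)), canonical order
  let totalTokens := if PySem.Set.contains totalTokens ['c', 'o', 'm']
    then (PySem.List.remove? totalTokens ['c', 'o', 'm']).getD totalTokens
    else totalTokens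
  totalTokens.map String.ofList

-- ===== PORT B =====
-- flushing the current slash-segment's dash-tokens and dot-pieces into the seen-dict
def pvFlushAll (seen : PySem.Dict (List Char) Unit) (dashes dots : List (List Char)) :
    PySem.Dict (List Char) Unit :=
  dots.foldl (fun s t => s.insert t ()) (dashes.foldl (fun s t => s.insert t ()) seen)

-- one character of Source B's scan: state = (seen, dashes, dots, dash, dot)
def pvStep (st : PySem.Dict (List Char) Unit × List (List Char) × List (List Char) × List Char × List Char)
    (c : Char) :
    PySem.Dict (List Char) Unit × List (List Char) × List (List Char) × List Char × List Char :=
  match st with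
  | (seen, dashes, dots, dash, dot) =>
    if c = '/' then (pvFlushAll seen (dashes ++ [dash]) (dots ++ [dot]), [], [], [], [])
    else if c = '-' then (seen, dashes ++ [dash], dots ++ [dot], [], [])
    else if c = '.' then (seen, dashes, dots ++ [dot], dash ++ [c], [])
    else (seen, dashes, dots, dash ++ [c], dot ++ [c])

def make_tokens_alt (f : String) : List String :=
  let st := (pvBytesRepr f).foldl pvStep ((PySem.Dict.empty : PySem.Dict (List Char) Unit), [], [], [], [])
  let seen := pvFlushAll st.1 (st.2.1 ++ [st.2.2.2.1]) (st.2.2.1 ++ [st.2.2.2.2])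
  (seen.keys.filter (fun t => t != ['c', 'o', 'm'])).map String.ofList

-- ===== PRECONDITION & SPEC =====
def Spec_make_tokens (f : String) (out : List String) : Prop := out = make_tokens_alt f
instance (f : String) (out : List String) : Decidable (Spec_make_tokens f out) := by unfold Spec_make_tokens; infer_instance

-- ===== CLAIM (what is proved, stated in full; the proofs are below) =====
def Claim_equal_make_tokens : Prop := ∀ (f : String), Dom_make_tokens f → Spec_make_tokens f (make_tokens f)

-- ===== LEMMAS AND PROOFS =====

lemma pv_modifyHead_id {α : Type} (l : List α) : l.modifyHead (fun x => x) = l := by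
  cases l <;> rfl

-- clean structural recursion for split by a single-char separator
def pvSplit1 (d : Char) : List Char → List (List Char)
  | [] => [[]]
  | c :: cs => if c = d then [] :: pvSplit1 d cs else (pvSplit1 d cs).modifyHead (c :: ·)

lemma pvSplit1_cons (d : Char) (cs : List Char) : ∃ h t, pvSplit1 d cs = h :: t := by
  cases cs with
  | nil => exact ⟨[], [], rfl⟩
  | cons c cs =>
      simp only [pvSplit1]
      split_ifs
      · exact ⟨_, _, rfl⟩
      · obtain ⟨h, t, he⟩ := pvSplit1_cons d cs
        exact ⟨_, _, by rw [he]; rfl⟩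

lemma pvGo_eq (d : Char) : ∀ (l : List Char) (fuel : Nat) (cur : List Char)
    (acc : List (List Char)), l.length < fuel →
    PySem.Chars.splitOn.go [d] fuel l cur acc
      = acc.reverse ++ (pvSplit1 d l).modifyHead (cur.reverse ++ ·) := by
  intro l
  induction l with
  | nil =>
      intro fuel cur acc hf
      obtain ⟨f, rfl⟩ : ∃ f, fuel = f + 1 := ⟨fuel - 1, by omega⟩
      rw [PySem.Chars.splitOn.go] <;> simp [pvSplit1]
  | cons c rest ih =>
      intro fuel cur acc hf
      obtain ⟨f, rfl⟩ : ∃ f, fuel = f + 1 := ⟨fuel - 1, by omega⟩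
      rw [PySem.Chars.splitOn.go]
      have hlen : rest.length < f := by simpa using hf
      by_cases hcd : c = d
      · subst hcd
        have hpre : ([c] : List Char).isPrefixOf (c :: rest) = true := by
          simp [List.isPrefixOf]
        rw [if_pos hpre]
        simp only [List.length_cons, List.length_nil, List.drop_succ_cons, List.drop_zero]
        rw [ih f [] (cur.reverse :: acc) hlen]
        simp [pvSplit1, pv_modifyHead_id]
      · have hpre : ([d] : List Char).isPrefixOf (c :: rest) = false := by
          simp [List.isPrefixOf, Ne.symm hcd]
        rw [if_neg (by simp [hpre])]
        rw [ih f (c :: cur) acc hlen]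
        obtain ⟨h, t, he⟩ := pvSplit1_cons d rest
        simp [pvSplit1, hcd, he]

lemma pvSplitOn_eq (d : Char) (cs : List Char) :
    PySem.Chars.splitOn cs [d] = pvSplit1 d cs := by
  unfold PySem.Chars.splitOn
  rw [pvGo_eq d cs (cs.length + 1) [] [] (by omega)]
  obtain ⟨h, t, he⟩ := pvSplit1_cons d cs
  simp [he]

-- the dash/dot tokens one slash-segment contributes, in A's order
def pvSegTokens (i : List Char) : List (List Char) :=
  let tokens := PySem.Chars.splitOn i ['-']
  tokens ++ tokens.flatMap (fun t => PySem.Chars.splitOn t ['.'])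

lemma pvSegTokens_eq (i : List Char) :
    pvSegTokens i = pvSplit1 '-' i ++ (pvSplit1 '-' i).flatMap (pvSplit1 '.') := by
  simp [pvSegTokens, pvSplitOn_eq]

-- A's accumulated total_Tokens is the flat list of segment contributions
lemma pvTotal_eq (segs : List (List Char)) (acc : List (List Char)) :
    segs.foldl (fun totalTokens i =>
      let tokens := PySem.Chars.splitOn i ['-']
      let tknsByDot := (PySem.List.pyRange 0 (PySem.List.len tokens)).foldl
        (fun tknsByDot j => tknsByDot ++ PySem.Chars.splitOn (PySem.List.pyGetD tokens j []) ['.']) []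
      totalTokens ++ tokens ++ tknsByDot) acc
    = acc ++ segs.flatMap pvSegTokens := by
  have hbd : ∀ tokens : List (List Char),
      (PySem.List.pyRange 0 (PySem.List.len tokens)).foldl
        (fun tknsByDot j => tknsByDot ++ PySem.Chars.splitOn (PySem.List.pyGetD tokens j []) ['.']) []
      = tokens.flatMap (fun t => PySem.Chars.splitOn t ['.']) := by
    intro tokens
    rw [PySem.List.foldl_append_eq_flatMap, List.nil_append]
    conv_rhs => rw [← PySem.List.map_pyGetD_pyRange_zero tokens []]
    rw [List.flatMap_map]
  have hstep : ∀ (totalTokens : List (List Char)), ∀ i ∈ segs,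
      (let tokens := PySem.Chars.splitOn i ['-']
       let tknsByDot := (PySem.List.pyRange 0 (PySem.List.len tokens)).foldl
         (fun tknsByDot j => tknsByDot ++ PySem.Chars.splitOn (PySem.List.pyGetD tokens j []) ['.']) []
       totalTokens ++ tokens ++ tknsByDot)
      = totalTokens ++ pvSegTokens i := by
    intro totalTokens i _
    show totalTokens ++ PySem.Chars.splitOn i ['-'] ++ _ = _
    rw [hbd]
    simp [pvSegTokens]
  rw [PySem.List.foldl_congr_mem segs _ (fun totalTokens i => totalTokens ++ pvSegTokens i) acc hstep,
      PySem.List.foldl_append_eq_flatMap]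

-- the emission order of B's scan, as a pure function of the remaining input and the state
def pvFlat : List Char → List (List Char) → List (List Char) → List Char → List Char → List (List Char)
  | [], d1, d2, a, b => (d1 ++ [a]) ++ (d2 ++ [b])
  | c :: cs, d1, d2, a, b =>
    if c = '/' then (d1 ++ [a]) ++ (d2 ++ [b]) ++ pvFlat cs [] [] [] []
    else if c = '-' then pvFlat cs (d1 ++ [a]) (d2 ++ [b]) [] []
    else if c = '.' then pvFlat cs d1 (d2 ++ [b]) (a ++ [c]) []
    else pvFlat cs d1 d2 (a ++ [c]) (b ++ [c])

lemma pvFlushAll_keys (seen : PySem.Dict (List Char) Unit) (L1 L2 : List (List Char)) :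
    (pvFlushAll seen L1 L2).keys = PySem.Set.update seen.keys (L1 ++ L2) := by
  unfold pvFlushAll
  rw [PySem.Dict.keys_foldl_insert L2 (fun _ _ => ()),
      PySem.Dict.keys_foldl_insert L1 (fun _ _ => ()),
      PySem.Set.update_append]

-- the keys of B's seen-dict after the scan and the final flush, by the scan invariant
lemma pvScan_keys : ∀ (cs : List Char) (seen : PySem.Dict (List Char) Unit)
    (d1 d2 : List (List Char)) (a b : List Char),
    (pvFlushAll (cs.foldl pvStep (seen, d1, d2, a, b)).1
        ((cs.foldl pvStep (seen, d1, d2, a, b)).2.1 ++ [(cs.foldl pvStep (seen, d1, d2, a, b)).2.2.2.1])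
        ((cs.foldl pvStep (seen, d1, d2, a, b)).2.2.1 ++ [(cs.foldl pvStep (seen, d1, d2, a, b)).2.2.2.2])).keys
      = PySem.Set.update seen.keys (pvFlat cs d1 d2 a b) := by
  intro cs
  induction cs with
  | nil =>
      intro seen d1 d2 a b
      simp only [List.foldl_nil, pvFlushAll_keys, pvFlat]
  | cons c cs ih =>
      intro seen d1 d2 a b
      simp only [List.foldl_cons, pvStep, pvFlat]
      by_cases h1 : c = '/'
      · simp only [if_pos h1, ih, pvFlushAll_keys, PySem.Set.update_append]
      · by_cases h2 : c = '-'
        · simp only [if_neg h1, if_pos h2, ih]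
        · by_cases h3 : c = '.'
          · simp only [if_neg h1, if_neg h2, if_pos h3, ih]
          · simp only [if_neg h1, if_neg h2, if_neg h3, ih]

-- what one slash-segment contributes, in pvSplit1 terms
def pvSegTok1 (seg : List Char) : List (List Char) :=
  pvSplit1 '-' seg ++ (pvSplit1 '-' seg).flatMap (pvSplit1 '.')

-- the scan's emission order is A's order: generalized over the state
lemma pvFlat_eq : ∀ (cs : List Char) (d1 d2 : List (List Char)) (a b : List Char)
    (s0 : List Char) (r : List (List Char)), pvSplit1 '/' cs = s0 :: r →
    pvFlat cs d1 d2 a b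
      = d1 ++ (pvSplit1 '-' s0).modifyHead (a ++ ·)
        ++ (d2 ++ ((pvSplit1 '-' s0).flatMap (pvSplit1 '.')).modifyHead (b ++ ·)
        ++ r.flatMap pvSegTok1) := by
  intro cs
  induction cs with
  | nil =>
      intro d1 d2 a b s0 r he
      simp only [pvSplit1, List.cons.injEq] at he
      obtain ⟨rfl, rfl⟩ := he
      simp [pvFlat, pvSplit1]
  | cons c cs ih =>
      intro d1 d2 a b s0 r he
      by_cases h1 : c = '/'
      · subst h1
        simp only [pvSplit1] at he
        obtain ⟨rfl, rfl⟩ := he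
        obtain ⟨s0', r', he'⟩ := pvSplit1_cons '/' cs
        simp only [pvFlat]
        rw [ih [] [] [] [] s0' r' he', he']
        simp [pvSplit1, pvSegTok1, pv_modifyHead_id]
      · rw [show pvSplit1 '/' (c :: cs) = (pvSplit1 '/' cs).modifyHead (c :: ·) by
              simp [pvSplit1, h1]] at he
        obtain ⟨t0, ts, he'⟩ := pvSplit1_cons '/' cs
        rw [he', List.modifyHead_cons, List.cons.injEq] at he
        obtain ⟨rfl, rfl⟩ := he
        by_cases h2 : c = '-'
        · subst h2
          simp only [pvFlat, if_neg h1]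
          rw [ih (d1 ++ [a]) (d2 ++ [b]) [] [] t0 ts he']
          simp [pvSplit1, pv_modifyHead_id]
        · by_cases h3 : c = '.'
          · subst h3
            simp only [pvFlat, if_neg h1, if_neg h2]
            rw [ih d1 (d2 ++ [b]) (a ++ ['.']) [] t0 ts he']
            obtain ⟨u0, us, heu⟩ := pvSplit1_cons '-' t0
            simp [pvSplit1, heu, h2, pv_modifyHead_id]
          · simp only [pvFlat, if_neg h1, if_neg h2, if_neg h3]
            rw [ih d1 d2 (a ++ [c]) (b ++ [c]) t0 ts he']
            obtain ⟨u0, us, heu⟩ := pvSplit1_cons '-' t0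
            obtain ⟨p0, ps, hep⟩ := pvSplit1_cons '.' u0
            simp [pvSplit1, heu, hep, h2, h3]

-- the fully deduplicated, 'com'-free token list both ports compute
theorem make_tokens_eq (f : String) : make_tokens f = make_tokens_alt f := by
  have hflat : pvFlat (pvBytesRepr f) [] [] [] []
      = (PySem.Chars.splitOn (pvBytesRepr f) ['/']).flatMap pvSegTokens := by
    obtain ⟨s0, r, he⟩ := pvSplit1_cons '/' (pvBytesRepr f)
    rw [pvFlat_eq (pvBytesRepr f) [] [] [] [] s0 r he, pvSplitOn_eq, he]
    have hst : pvSegTok1 = pvSegTokens := funext fun i => ((pvSegTokens_eq i).symm)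
    simp [pv_modifyHead_id, pvSegTokens_eq, hst]
  unfold make_tokens make_tokens_alt
  simp only [pvScan_keys, PySem.Dict.keys_empty, PySem.Set.update_nil_left, hflat, pvTotal_eq,
    List.nil_append]
  have hnd : (PySem.Set.ofList ((PySem.Chars.splitOn (pvBytesRepr f) ['/']).flatMap pvSegTokens)).Nodup :=
    PySem.Set.nodup_ofList _
  generalize PySem.Set.ofList ((PySem.Chars.splitOn (pvBytesRepr f) ['/']).flatMap pvSegTokens) = S at hnd ⊢
  by_cases hm : ['c', 'o', 'm'] ∈ S
  · rw [if_pos (by simpa [PySem.Set.contains_iff] using hm),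
        PySem.List.remove?_eq_some_erase S _ hm, Option.getD_some,
        hnd.erase_eq_filter]
  · have hall : ∀ a ∈ S, (a != ['c', 'o', 'm']) = true := by
      intro a ha
      simp only [bne_iff_ne, ne_eq]
      intro h
      exact hm (h ▸ ha)
    rw [if_neg (by simpa [PySem.Set.contains_iff] using hm), List.filter_eq_self.mpr hall]

-- ===== VERDICT (by name: the statement is the Claim_ definition above) =====
theorem make_tokens_spec : Claim_equal_make_tokens := by
  intro f _
  show make_tokens f = make_tokens_alt f
  exact make_tokens_eq f
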